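-- pv_equiv track=rewrite | github.com/GoLP-IST/nata | nata/utils/backends.py | sort_particle_quantities
-- ===== SOURCE A (Python) =====
-- from typing import MutableSequence
-- from typing import Optional
-- from typing import Sequence
--
-- def sort_particle_quantities(
--     names: MutableSequence[str], order: Optional[Sequence[str]] = None
-- ):
--     if order is None:
--         return sorted(names)
--     else:
--         sorted_ = []
--         for key in order:
--             filtered_names = filter(lambda elem: elem.startswith(key), names)
--             for s in sorted(filtered_names):
--                 sorted_.append(s)
--                 names.remove(s)
--
--         return sorted_ + sorted(names)
-- ===== SOURCE B (Python) =====
-- def sort_particle_quantities(names, order=None):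
--     # Return-value equivalent to A; does NOT empty matched entries out of `names` as A does.
--     if order is None:
--         return sorted(names)
--     n_keys = len(order)
--     buckets = [[] for _ in range(n_keys + 1)]
--     for name in names:
--         idx = next((i for i, key in enumerate(order) if name.startswith(key)), n_keys)
--         buckets[idx].append(name)
--     result = []
--     for bucket in buckets:
--         result.extend(sorted(bucket))
--     return result
-- ===== Notes on version B (the rewrite author's own statement) =====
-- stated objective: alternative
-- what changed: Single pass assigns each name to the bucket of its first matching prefix key (or a trailing rest-bucket), then each bucket is sorted once and concatenated, replacing A's per-key filter-sort passes with one-by-one list.remove deletions; B does not mutate the input list.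
import Mathlib
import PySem

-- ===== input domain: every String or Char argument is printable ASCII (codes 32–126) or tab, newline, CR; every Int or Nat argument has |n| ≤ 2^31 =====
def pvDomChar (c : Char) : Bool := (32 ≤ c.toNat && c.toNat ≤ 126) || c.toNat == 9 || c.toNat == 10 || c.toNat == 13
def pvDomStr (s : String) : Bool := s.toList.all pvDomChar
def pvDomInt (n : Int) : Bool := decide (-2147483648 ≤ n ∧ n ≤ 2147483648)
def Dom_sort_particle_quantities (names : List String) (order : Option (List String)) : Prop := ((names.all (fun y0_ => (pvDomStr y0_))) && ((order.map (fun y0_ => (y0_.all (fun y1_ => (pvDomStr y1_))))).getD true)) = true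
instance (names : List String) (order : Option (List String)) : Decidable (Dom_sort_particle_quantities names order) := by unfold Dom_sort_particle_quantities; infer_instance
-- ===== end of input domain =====

-- B replaces A's per-key filter/sort passes with quadratic list.remove deletions by a single
-- bucket-assignment pass (first matching prefix key) followed by sorting each bucket once; the
-- equivalence is about the RETURN value only (Python A empties matched entries out of `names`,
-- B does not mutate it).


-- ===== PORT A =====
-- literal transliteration of A; `names.remove(s)` is `remove?`: it never fails here because s is
-- drawn from the current names, so `.getD st.2` only totalises the state type.
def sort_particle_quantities (names : List String) (order : Option (List String)) : List String :=
  match order with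
  | none => PySem.List.sorted names (fun x => x) false
  | some ord =>
      let st := ord.foldl (fun (st : List String × List String) key =>
        let filtered_names := st.2.filter (fun elem => PySem.Str.startswith elem key)
        (PySem.List.sorted filtered_names (fun x => x) false).foldl
          (fun (st2 : List String × List String) s =>
            (st2.1 ++ [s], (PySem.List.remove? st2.2 s).getD st2.2))
          st) (([] : List String), names)
      st.1 ++ PySem.List.sorted st.2 (fun x => x) false

-- ===== PORT B =====
-- transliteration of Source B; `next((i for i,key in enumerate(order) if name.startswith(key)), n_keys)`
-- is `findIdx?` with default; buckets[idx].append(name) is `set idx (getD idx [] ++ [name])`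
-- (idx is always in range, getD only totalises the lookup).
def sort_particle_quantities_alt (names : List String) (order : Option (List String)) : List String :=
  match order with
  | none => PySem.List.sorted names (fun x => x) false
  | some ord =>
      let nKeys := ord.length
      let buckets : List (List String) := List.replicate (nKeys + 1) []
      let buckets := names.foldl (fun (bs : List (List String)) name =>
          let idx := (ord.findIdx? (fun key => PySem.Str.startswith name key)).getD nKeys
          bs.set idx ((bs.getD idx []) ++ [name])) buckets
      buckets.foldl (fun res b => res ++ PySem.List.sorted b (fun x => x) false) []

-- ===== PRECONDITION & SPEC =====
def Spec_sort_particle_quantities (names : List String) (order : Option (List String)) (out : List String) : Prop := out = sort_particle_quantities_alt names order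
instance (names : List String) (order : Option (List String)) (out : List String) : Decidable (Spec_sort_particle_quantities names order out) := by unfold Spec_sort_particle_quantities; infer_instance

-- ===== CLAIM (what is proved, stated in full; the proofs are below) =====
def Claim_equal_sort_particle_quantities : Prop := ∀ (names : List String) (order : Option (List String)), Dom_sort_particle_quantities names order → Spec_sort_particle_quantities names order (sort_particle_quantities names order)

-- ===== LEMMAS AND PROOFS =====

/-- index of the first key in `ord` that is a prefix of `n` (ord.length if none). -/
def pvIdx (ord : List String) (n : String) : Nat :=
  (ord.findIdx? (fun key => PySem.Str.startswith n key)).getD ord.length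

/-- common normal form of both programs: per first-match-index buckets, sorted, concatenated. -/
def pvSpec (ord : List String) (ns : List String) : List String :=
  (List.range (ord.length + 1)).flatMap
    (fun i => PySem.List.sorted (ns.filter (fun n => pvIdx ord n == i)) (fun x => x) false)

theorem pvIdx_le (ord : List String) (n : String) : pvIdx ord n ≤ ord.length := by
  unfold pvIdx
  cases h : ord.findIdx? (fun key => PySem.Str.startswith n key) with
  | none => simp
  | some i =>
      have := List.findIdx?_eq_some_iff_findIdx_eq.1 h
      simp; omega

theorem pvIdx_nil (n : String) : pvIdx [] n = 0 := rfl

theorem pvIdx_cons (k : String) (ks : List String) (n : String) :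
    pvIdx (k :: ks) n =
      (if PySem.Str.startswith n k then 0 else pvIdx ks n + 1) := by
  unfold pvIdx
  simp only [List.findIdx?_cons, PySem.Str.startswith_eq, List.length_cons]
  by_cases h : PySem.Chars.startswith n.toList k.toList
  · simp [h]
  · cases hf : List.findIdx? (fun key => PySem.Chars.startswith n.toList key.toList) ks <;>
      simp [h]

-- ---------- B side ----------

theorem pv_map_range_set {α : Type} (g : Nat → α) (m j : Nat) (x : α) :
    ((List.range m).map g).set j x = (List.range m).map (fun i => if i = j then x else g i) := by
  apply List.ext_getElem
  · simp
  · intro i hi _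
    simp only [List.getElem_set, List.getElem_map, List.getElem_range]
    by_cases h : j = i <;> simp [h]; omega

theorem pv_map_range_getD {α : Type} (g : Nat → α) (m j : Nat) (hj : j < m) (d : α) :
    ((List.range m).map g).getD j d = g j := by
  rw [List.getD_eq_getElem?_getD]
  simp [hj]

/-- the bucket fold of B builds, in every bucket i, its old content followed by the names whose
first-match index is i, in input order. -/
theorem pv_buckets_fold (ord : List String) (ns : List String) :
    ∀ g : Nat → List String,
      ns.foldl (fun (bs : List (List String)) name =>
          let idx := (ord.findIdx? (fun key => PySem.Str.startswith name key)).getD ord.length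
          bs.set idx ((bs.getD idx []) ++ [name])) ((List.range (ord.length + 1)).map g)
      = (List.range (ord.length + 1)).map
          (fun i => g i ++ ns.filter (fun n => pvIdx ord n == i)) := by
  induction ns with
  | nil => intro g; simp
  | cons n ns ih =>
      intro g
      have hlt : pvIdx ord n < ord.length + 1 := Nat.lt_succ_of_le (pvIdx_le ord n)
      simp only [List.foldl_cons]
      rw [show ((ord.findIdx? (fun key => PySem.Str.startswith n key)).getD ord.length) = pvIdx ord n from rfl,
          pv_map_range_getD _ _ _ hlt, pv_map_range_set, ih]
      apply List.map_congr_left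
      intro i hi
      by_cases h : i = pvIdx ord n
      · subst h; simp
      · have : (pvIdx ord n == i) = false := by simp [Ne.symm h]
        simp [h, this]

theorem pv_alt_eq_spec (ns ord : List String) :
    sort_particle_quantities_alt ns (some ord) = pvSpec ord ns := by
  unfold sort_particle_quantities_alt pvSpec
  simp only
  rw [show (List.replicate (ord.length + 1) ([] : List String))
        = (List.range (ord.length + 1)).map (fun _ => []) by simp [List.map_const'],
      pv_buckets_fold ord ns (fun _ => []),
      PySem.List.foldl_append_eq_flatMap, List.flatMap_map]
  simp

-- ---------- A side ----------

theorem pv_filter_erase_of (q : String → Bool) (ns : List String) (s : String) (hq : q s) :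
    (ns.erase s).filter q = (ns.filter q).erase s ∧
    (ns.erase s).filter (fun n => !q n) = ns.filter (fun n => !q n) := by
  induction ns with
  | nil => simp
  | cons a ns ih =>
      by_cases h : a = s
      · subst h; simp [List.erase_cons_head, hq]
      · have hne : (a == s) = false := by simp [h]
        constructor
        · by_cases hqa : q a
          · simp [hne, hqa, ih.1]
          · simp [hne, hqa, ih.1]
        · by_cases hqa : q a <;>
            simp [hne, hqa, ih.2]

/-- removing, one by one, the elements of any permutation of `ns.filter q` from `ns` leaves
exactly `ns.filter (!q)`, while the output accumulator collects the removed elements in order. -/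
theorem pv_remove_fold (q : String → Bool) (m : List String) :
    ∀ ns acc, m.Perm (ns.filter q) →
      m.foldl (fun (st2 : List String × List String) s =>
          (st2.1 ++ [s], (PySem.List.remove? st2.2 s).getD st2.2)) (acc, ns)
      = (acc ++ m, ns.filter (fun n => !q n)) := by
  induction m with
  | nil =>
      intro ns acc hp
      have h0 : ns.filter q = [] := (List.Perm.nil_eq hp).symm
      have : ∀ x ∈ ns, !q x := by
        intro x hx
        by_contra hqx
        have : x ∈ ns.filter q := List.mem_filter.2 ⟨hx, by simpa using hqx⟩
        simp [h0] at this
      simp [List.filter_eq_self.2 this]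
  | cons s m ih =>
      intro ns acc hp
      have hsf : s ∈ ns.filter q := (List.cons_perm_iff_perm_erase.1 hp).1
      have hsn : s ∈ ns := (List.mem_filter.1 hsf).1
      have hqs : q s := (List.mem_filter.1 hsf).2
      have hrem : PySem.List.remove? ns s = some (ns.erase s) :=
        PySem.List.remove?_eq_some_erase ns s hsn
      have hperm : m.Perm ((ns.erase s).filter q) := by
        rw [(pv_filter_erase_of q ns s hqs).1]
        exact (List.cons_perm_iff_perm_erase.1 hp).2
      simp only [List.foldl_cons, hrem, Option.getD_some]
      rw [ih (ns.erase s) (acc ++ [s]) hperm, (pv_filter_erase_of q ns s hqs).2]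
      simp

/-- one key of A's outer loop: emit the sorted matching names, keep the non-matching ones. -/
theorem pv_key_step (key : String) (st : List String × List String) :
    (PySem.List.sorted (st.2.filter (fun elem => PySem.Str.startswith elem key)) (fun x => x) false).foldl
        (fun (st2 : List String × List String) s =>
          (st2.1 ++ [s], (PySem.List.remove? st2.2 s).getD st2.2)) st
    = (st.1 ++ PySem.List.sorted (st.2.filter (fun elem => PySem.Str.startswith elem key)) (fun x => x) false,
       st.2.filter (fun n => !PySem.Str.startswith n key)) := by
  exact pv_remove_fold _ _ st.2 st.1 (PySem.List.sorted_perm _ _ _)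

/-- A's else-branch, with key list and accumulator generalised, equals the bucket normal form. -/
theorem pv_a_fold (ord : List String) :
    ∀ ns acc,
      (let st := ord.foldl (fun (st : List String × List String) key =>
        let filtered_names := st.2.filter (fun elem => PySem.Str.startswith elem key)
        (PySem.List.sorted filtered_names (fun x => x) false).foldl
          (fun (st2 : List String × List String) s =>
            (st2.1 ++ [s], (PySem.List.remove? st2.2 s).getD st2.2))
          st) (acc, ns)
       st.1 ++ PySem.List.sorted st.2 (fun x => x) false)
      = acc ++ pvSpec ord ns := by
  induction ord with
  | nil =>
      intro ns acc
      simp only [List.foldl_nil, pvSpec]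
      have : ∀ n ∈ ns, (pvIdx [] n == 0) = true := by intro n _; simp [pvIdx_nil]
      simp [List.filter_eq_self.2 this]
  | cons k ks ih =>
      intro ns acc
      have h0 : ns.filter (fun n => pvIdx (k :: ks) n == 0)
          = ns.filter (fun elem => PySem.Str.startswith elem k) := by
        apply List.filter_congr
        intro n _
        rw [pvIdx_cons]
        by_cases h : PySem.Chars.startswith n.toList k.toList <;>
          simp [PySem.Str.startswith_eq, h]
      have h1 : ∀ i : Nat,
          ns.filter (fun n => pvIdx (k :: ks) n == i + 1)
          = (ns.filter (fun n => !PySem.Str.startswith n k)).filter (fun n => pvIdx ks n == i) := by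
        intro i
        rw [List.filter_filter]
        apply List.filter_congr
        intro n _
        rw [pvIdx_cons]
        by_cases h : PySem.Chars.startswith n.toList k.toList <;>
          simp [PySem.Str.startswith_eq, h]
      have hs : pvSpec (k :: ks) ns
          = PySem.List.sorted (ns.filter (fun elem => PySem.Str.startswith elem k)) (fun x => x) false
            ++ pvSpec ks (ns.filter (fun n => !PySem.Str.startswith n k)) := by
        unfold pvSpec
        rw [show (k :: ks).length + 1 = (ks.length + 1) + 1 by simp,
            List.range_succ_eq_map, List.flatMap_cons, List.flatMap_map]
        congr 1
        · rw [h0]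
        · exact List.flatMap_congr (fun i _ => by rw [Nat.succ_eq_add_one, h1 i])
      simp only [List.foldl_cons, pv_key_step k (acc, ns)]
      rw [ih (ns.filter (fun n => !PySem.Str.startswith n k))
            (acc ++ PySem.List.sorted (ns.filter (fun elem => PySem.Str.startswith elem k)) (fun x => x) false),
          hs]
      simp [List.append_assoc]

-- ===== VERDICT (by name: the statement is the Claim_ definition above) =====
theorem sort_particle_quantities_spec : Claim_equal_sort_particle_quantities := by
  intro names order _
  unfold Spec_sort_particle_quantities
  cases order with
  | none => rfl
  | some ord =>
      rw [pv_alt_eq_spec names ord]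
      show (let st := ord.foldl _ (([] : List String), names);
            st.1 ++ PySem.List.sorted st.2 (fun x => x) false) = _
      simpa using pv_a_fold ord names []
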